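-- pv_equiv track=rewrite | github.com/SarahOssama/Distrbution | AssistantsDistribution.py | distribute_assistants
-- ===== SOURCE A (Python) =====
-- def distribute_assistants(students, assistants, initial_counts):
--     assistant_counts = initial_counts  # Initialize with initial counts
--     assignment = {}
--
--     for student in students:
--         chosen_assistant = min(assistant_counts, key=assistant_counts.get)
--         assignment[student] = chosen_assistant
--         assistant_counts[chosen_assistant] += 1
--
--     return assignment, assistant_counts
-- ===== SOURCE B (Python) =====
-- import bisect
--
-- def distribute_assistants(students, assistants, initial_counts):
--     # Sorted priority queue of (count, insertion_index); ties broken by dict order,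
--     # exactly like min(counts, key=counts.get). Does not mutate initial_counts.
--     names = list(initial_counts.keys())
--     pq = []
--     for i, (name, c) in enumerate(initial_counts.items()):
--         bisect.insort(pq, (c, i))
--     assignment = {}
--     for student in students:
--         c, i = pq[0]
--         pq = pq[1:]
--         assignment[student] = names[i]
--         bisect.insort(pq, (c + 1, i))
--     counts = dict((names[i], c) for c, i in sorted(pq, key=lambda t: t[1]))
--     return assignment, counts
-- ===== Notes on version B (the rewrite author's own statement) =====
-- stated objective: faster
-- what changed: B replaces A's per-student linear min-scan over the counts dict with a sorted priority queue of (count, insertion_index) pairs maintained by bisect.insort (pop the head, reinsert with count+1), reconstructing the counts dict by index at the end; Pre_ only excludes the inputs where A raises (nonempty students with an empty counts dict, ValueError from min(); B raises IndexError there too).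
import Mathlib
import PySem

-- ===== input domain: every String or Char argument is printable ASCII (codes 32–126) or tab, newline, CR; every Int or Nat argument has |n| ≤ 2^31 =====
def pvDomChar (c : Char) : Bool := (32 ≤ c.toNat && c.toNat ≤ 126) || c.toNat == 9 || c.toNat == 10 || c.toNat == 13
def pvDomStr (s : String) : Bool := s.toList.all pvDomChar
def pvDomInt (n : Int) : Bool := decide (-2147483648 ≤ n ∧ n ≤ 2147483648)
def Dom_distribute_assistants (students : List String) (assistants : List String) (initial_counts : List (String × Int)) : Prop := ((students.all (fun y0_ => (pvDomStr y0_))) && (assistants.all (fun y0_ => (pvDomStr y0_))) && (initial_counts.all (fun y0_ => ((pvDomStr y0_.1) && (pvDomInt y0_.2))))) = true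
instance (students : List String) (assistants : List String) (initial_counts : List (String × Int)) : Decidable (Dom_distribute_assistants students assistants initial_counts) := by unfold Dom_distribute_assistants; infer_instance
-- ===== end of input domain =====

-- B replaces A's per-student linear min-scan over the dict with a sorted priority queue of
-- (count, insertion_index) pairs maintained by binary-search insertion (objective: faster,
-- constant-factor). A mutates initial_counts in place; B does not — the equivalence proved
-- here is about the return value only.


-- ===== PORT A =====
-- loop body of A: chosen = min(assistant_counts, key=assistant_counts.get) (first key with
-- minimal value, in dict insertion order; every key is present so .get is exactly getD _ 0),
-- then assignment[student] = chosen and assistant_counts[chosen] += 1.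
-- When the dict is empty Python's min raises ValueError (excluded by Pre_); the port leaves
-- the state unchanged there.
def pvStepA (s : PySem.Dict String String × PySem.Dict String Int) (student : String) :
    PySem.Dict String String × PySem.Dict String Int :=
  match PySem.List.min? s.2.keys (fun k => s.2.getD k 0) with
  | some chosen => (s.1.insert student chosen, s.2.insert chosen (s.2.getD chosen 0 + 1))
  | none => s

def distribute_assistants (students : List String) (assistants : List String) (initial_counts : List (String × Int)) : (List (String × String)) × (List (String × Int)) :=
  let st := students.foldl pvStepA (PySem.Dict.empty, PySem.Dict.ofList initial_counts)
  (st.1.items, st.2.items)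

-- ===== PORT B =====
-- Python tuple comparison (c1, i1) < (c2, i2), lexicographic on Int pairs.
def pvLexLt (a b : Int × Int) : Bool := a.1 < b.1 || (a.1 == b.1 && a.2 < b.2)

-- loop body of B: c, i = pq[0]; pq = pq[1:]; assignment[student] = names[i];
-- bisect.insort(pq, (c + 1, i)).  names[i] is always in range (pyGetD is exact there);
-- pq empty (Python: IndexError, excluded by Pre_) leaves the state unchanged.
def pvStepB (names : List String) (s : PySem.Dict String String × List (Int × Int)) (student : String) :
    PySem.Dict String String × List (Int × Int) :=
  match s.2 with
  | [] => s
  | (c, i) :: rest =>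
      (s.1.insert student (PySem.List.pyGetD names i ""),
       PySem.List.insertBy pvLexLt (c + 1, i) rest)

def distribute_assistants_alt (students : List String) (assistants : List String) (initial_counts : List (String × Int)) : (List (String × String)) × (List (String × Int)) :=
  let d0 := PySem.Dict.ofList initial_counts
  let names := d0.keys
  -- for i, (name, c) in enumerate(initial_counts.items()): bisect.insort(pq, (c, i))
  let pq0 := (d0.items.zipIdx).foldl
      (fun pq p => PySem.List.insertBy pvLexLt (p.1.2, (p.2 : Int)) pq) []
  let st := students.foldl (pvStepB names) (PySem.Dict.empty, pq0)
  (st.1.items,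
   (PySem.Dict.ofList ((PySem.List.sorted st.2 (fun t => t.2) false).map
      (fun t => (PySem.List.pyGetD names t.2 "", t.1)))).items)

-- ===== PRECONDITION & SPEC =====
-- Pre_ excludes only the inputs where Python A raises: a nonempty student list with an empty
-- counts dict (min() of an empty sequence, ValueError; B's pq[0] raises IndexError there too).
def Pre_distribute_assistants (students : List String) (assistants : List String) (initial_counts : List (String × Int)) : Prop :=
  students = [] ∨ initial_counts ≠ []
instance (students : List String) (assistants : List String) (initial_counts : List (String × Int)) : Decidable (Pre_distribute_assistants students assistants initial_counts) := by unfold Pre_distribute_assistants; infer_instance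

def pvWitness_distribute_assistants : List String × List String × (List (String × Int)) :=
  (["s1", "s2", "s1"], ["x"], [("a", 1), ("b", 0)])

def Spec_distribute_assistants (students : List String) (assistants : List String) (initial_counts : List (String × Int)) (out : (List (String × String)) × (List (String × Int))) : Prop := out = distribute_assistants_alt students assistants initial_counts
instance (students : List String) (assistants : List String) (initial_counts : List (String × Int)) (out : (List (String × String)) × (List (String × Int))) : Decidable (Spec_distribute_assistants students assistants initial_counts out) := by unfold Spec_distribute_assistants; infer_instance

-- ===== CLAIM (what is proved, stated in full; the proofs are below) =====
def Claim_equal_distribute_assistants : Prop := ∀ (students : List String) (assistants : List String) (initial_counts : List (String × Int)), Dom_distribute_assistants students assistants initial_counts → Pre_distribute_assistants students assistants initial_counts → Spec_distribute_assistants students assistants initial_counts (distribute_assistants students assistants initial_counts)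

-- ===== LEMMAS AND PROOFS =====

theorem pvLexLt_iff (a b : Int × Int) :
    pvLexLt a b = true ↔ (a.1 < b.1 ∨ (a.1 = b.1 ∧ a.2 < b.2)) := by
  simp [pvLexLt]

-- the model: counts as a function of the insertion index
def pvS (f : Nat → Int) (n : Nat) : List (Int × Int) :=
  (List.range n).map (fun k => (f k, (k : Int)))

def pvInv (names : List String) (f : Nat → Int) (d : PySem.Dict String Int) (pq : List (Int × Int)) : Prop :=
  d.keys = names ∧
  (∀ j : Nat, ∀ h : j < names.length, d.getD (names[j]'h) 0 = f j) ∧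
  pq.Perm (pvS f names.length) ∧
  pq.Pairwise (fun a b => pvLexLt a b = true)

theorem pv_go_keep {α : Type} (f : α → Int) :
    ∀ (t : List α) (m : α), (∀ x ∈ t, f m ≤ f x) →
      t.foldl (fun acc x => match acc with
        | none => some x
        | some mm => if f x < f mm then some x else some mm) (some m) = some m := by
  intro t
  induction t with
  | nil => intro m _; rfl
  | cons a t ih =>
    intro m h
    simp only [List.foldl_cons]
    have hna : ¬ f a < f m := not_lt.2 (h a (by simp))
    simp only [hna, if_false]
    exact ih m (fun x hx => h x (by simp [hx]))

theorem pv_go_first {α : Type} (f : α → Int) :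
    ∀ (t : List α) (m : α) (j : Nat) (hj : j < t.length),
      f (t[j]'hj) < f m →
      (∀ k, (hk : k < j) → f (t[j]'hj) < f (t[k]'(hk.trans hj))) →
      (∀ k, (hk : k < t.length) → f (t[j]'hj) ≤ f (t[k]'hk)) →
      t.foldl (fun acc x => match acc with
        | none => some x
        | some mm => if f x < f mm then some x else some mm) (some m) = some (t[j]'hj) := by
  intro t
  induction t with
  | nil => intro m j hj; exact absurd hj (by simp)
  | cons a t ih =>
    intro m j hj hm hlt hle
    simp only [List.foldl_cons]
    cases j with
    | zero =>
      simp only [List.getElem_cons_zero] at hm hle ⊢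
      simp only [hm, if_true]
      exact pv_go_keep f t a (fun x hx => by
        obtain ⟨k, hk, rfl⟩ := List.mem_iff_getElem.1 hx
        exact hle (k+1) (by simpa using Nat.succ_lt_succ hk))
    | succ j' =>
      have hja : f ((a :: t)[j'+1]'hj) < f a := hlt 0 (Nat.succ_pos _)
      simp only [List.getElem_cons_succ] at hja hm ⊢
      have hstep : (if f a < f m then some a else some m) = some (if f a < f m then a else m) := by
        split <;> rfl
      rw [hstep]
      have hm' : f (t[j']'(by simpa using hj)) < f (if f a < f m then a else m) := by
        split <;> assumption
      have := ih (if f a < f m then a else m) j' (by simpa using hj) hm'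
        (fun k hk => by
          have := hlt (k+1) (Nat.succ_lt_succ hk)
          simpa using this)
        (fun k hk => by
          have := hle (k+1) (by simpa using Nat.succ_lt_succ hk)
          simpa using this)
      exact this

theorem pv_min?_spec {α : Type} (f : α → Int) (l : List α) (j : Nat) (hj : j < l.length)
    (hlt : ∀ k, (hk : k < j) → f (l[j]'hj) < f (l[k]'(hk.trans hj)))
    (hle : ∀ k, (hk : k < l.length) → f (l[j]'hj) ≤ f (l[k]'hk)) :
    PySem.List.min? l f = some (l[j]'hj) := by
  cases l with
  | nil => exact absurd hj (by simp)
  | cons a t =>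
    show List.foldl _ (some a) t = _
    cases j with
    | zero =>
      simp only [List.getElem_cons_zero] at *
      exact pv_go_keep f t a (fun x hx => by
        obtain ⟨k, hk, rfl⟩ := List.mem_iff_getElem.1 hx
        exact hle (k+1) (by simpa using Nat.succ_lt_succ hk))
    | succ j' =>
      have := pv_go_first f t a j' (by simpa using hj)
        (by have := hlt 0 (Nat.succ_pos _); simpa using this)
        (fun k hk => by have := hlt (k+1) (Nat.succ_lt_succ hk); simpa using this)
        (fun k hk => by have := hle (k+1) (by simpa using Nat.succ_lt_succ hk); simpa using this)
      simpa using this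

theorem pv_insertBy_pairwise (x : Int × Int) :
    ∀ (ys : List (Int × Int)), ys.Pairwise (fun a b => pvLexLt a b = true) →
      (∀ y ∈ ys, y.2 ≠ x.2) →
      (PySem.List.insertBy pvLexLt x ys).Pairwise (fun a b => pvLexLt a b = true) := by
  intro ys
  induction ys with
  | nil => intro _ _; simp [PySem.List.insertBy]
  | cons y ys ih =>
    intro hp hs
    rw [PySem.List.insertBy]
    split
    · rename_i hxy
      refine List.Pairwise.cons ?_ hp
      intro z hz
      rcases List.mem_cons.1 hz with rfl | hz
      · exact hxy
      · have hyz := (List.pairwise_cons.1 hp).1 z hz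
        rw [pvLexLt_iff] at *
        omega
    · rename_i hxy
      have hp' := (List.pairwise_cons.1 hp).2
      refine List.Pairwise.cons ?_ (ih hp' (fun z hz => hs z (by simp [hz])))
      intro z hz
      rw [PySem.List.insertBy_mem_iff] at hz
      rcases hz with hz | hz
      · subst hz
        have h2 := hs y (by simp)
        have hxy' : ¬ (z.1 < y.1 ∨ (z.1 = y.1 ∧ z.2 < y.2)) := by
          rw [← pvLexLt_iff]; simpa using hxy
        rw [pvLexLt_iff]
        omega
      · exact (List.pairwise_cons.1 hp).1 z hz

theorem pv_build_go :
    ∀ (L acc : List (Int × Int)), acc.Pairwise (fun a b => pvLexLt a b = true) →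
      ((acc ++ L).map Prod.snd).Nodup →
      (L.foldl (fun pq x => PySem.List.insertBy pvLexLt x pq) acc).Perm (acc ++ L) ∧
      (L.foldl (fun pq x => PySem.List.insertBy pvLexLt x pq) acc).Pairwise (fun a b => pvLexLt a b = true) := by
  intro L
  induction L with
  | nil => intro acc hp _; exact ⟨by simp, hp⟩
  | cons x L ih =>
    intro acc hp hnd
    simp only [List.foldl_cons]
    have hx2 : ∀ y ∈ acc, y.2 ≠ x.2 := by
      intro y hy he
      have h1 : ((acc ++ x :: L).map Prod.snd).Nodup := hnd
      rw [List.map_append, List.nodup_append] at h1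
      exact h1.2.2 y.2 (List.mem_map_of_mem hy) x.2 (by simp) he
    have hacc' : (PySem.List.insertBy pvLexLt x acc).Pairwise (fun a b => pvLexLt a b = true) :=
      pv_insertBy_pairwise x acc hp hx2
    have hperm : (PySem.List.insertBy pvLexLt x acc).Perm (x :: acc) :=
      PySem.List.insertBy_perm pvLexLt x acc
    have hmid : ((PySem.List.insertBy pvLexLt x acc) ++ L).Perm (acc ++ x :: L) :=
      (hperm.append_right L).trans (by simpa using (List.perm_middle (a := x) (l₁ := acc) (l₂ := L)).symm)
    have hnd' : (((PySem.List.insertBy pvLexLt x acc) ++ L).map Prod.snd).Nodup :=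
      ((hmid.map Prod.snd).nodup_iff).2 hnd
    obtain ⟨p1, p2⟩ := ih _ hacc' hnd'
    exact ⟨p1.trans hmid, p2⟩

theorem pv_step (names : List String) (hnd : names.Nodup) (f : Nat → Int)
    (d : PySem.Dict String Int) (pq : List (Int × Int))
    (asg : PySem.Dict String String) (h : pvInv names f d pq) (s : String) :
    ∃ f', (pvStepA (asg, d) s).1 = (pvStepB names (asg, pq) s).1 ∧
      pvInv names f' (pvStepA (asg, d) s).2 (pvStepB names (asg, pq) s).2 := by
  obtain ⟨hk, hg, hperm, hpw⟩ := h
  cases pq with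
  | nil =>
    have hn0 : pvS f names.length = [] := hperm.symm.eq_nil
    have hlen : names.length = 0 := by
      by_contra hne
      have h0 : (0 : Nat) ∈ List.range names.length := List.mem_range.2 (Nat.pos_of_ne_zero hne)
      have h1 := List.mem_map_of_mem (f := fun k : Nat => ((f k : Int), (k : Int))) h0
      rw [show ((List.range names.length).map fun k : Nat => ((f k : Int), (k : Int))) = pvS f names.length from rfl, hn0] at h1
      exact absurd h1 (by simp)
    have hnames : names = [] := List.length_eq_zero_iff.1 hlen
    have hmin : PySem.List.min? d.keys (fun k => d.getD k 0) = none := by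
      rw [hk, hnames]; rfl
    refine ⟨f, ?_, ?_⟩
    · simp [pvStepA, pvStepB, hmin]
    · simp only [pvStepA, pvStepB, hmin]
      exact ⟨hk, hg, hperm, hpw⟩
  | cons ci rest =>
    obtain ⟨c, i⟩ := ci
    -- head is in the model
    have hmem : (c, i) ∈ pvS f names.length := hperm.mem_iff.1 (by simp)
    obtain ⟨j, hj, hgj⟩ : ∃ j, ∃ hj : j < names.length, (f j, (j : Int)) = (c, i) := by
      simp only [pvS, List.mem_map, List.mem_range] at hmem
      obtain ⟨j, hj, he⟩ := hmem
      exact ⟨j, hj, he⟩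
    have hc : c = f j := by cases hgj; rfl
    have hi : i = (j : Int) := by cases hgj; rfl
    subst hc; subst hi
    -- seconds of pq are distinct
    have hsnd : ((((f j : Int), (j : Int)) :: rest).map Prod.snd).Nodup := by
      have h1 : ((pvS f names.length).map Prod.snd).Nodup := by
        simp only [pvS, List.map_map]
        have : (Prod.snd ∘ fun k : Nat => ((f k : Int), (k : Int))) = fun k : Nat => (k : Int) := rfl
        rw [this]
        exact (List.nodup_range).map (fun a b hab => by exact_mod_cast hab)
      exact ((hperm.map Prod.snd).nodup_iff).2 h1
    have hrest2 : ∀ y ∈ rest, y.2 ≠ (j : Int) := by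
      intro y hy he
      have : (j : Int) ∉ rest.map Prod.snd := by
        simp only [List.map_cons, List.nodup_cons] at hsnd
        exact hsnd.1
      exact this (he ▸ List.mem_map_of_mem hy)
    -- head is the lex-min
    have hlexmin : ∀ y ∈ pvS f names.length, y = ((f j : Int), (j : Int)) ∨
        pvLexLt ((f j : Int), (j : Int)) y = true := by
      intro y hy
      have := hperm.symm.mem_iff.1 hy
      rcases List.mem_cons.1 this with hh | hh
      · exact Or.inl hh
      · exact Or.inr (List.rel_of_pairwise_cons hpw hh)
    -- A chooses names[j]
    have hchosen : PySem.List.min? d.keys (fun k => d.getD k 0) = some (names[j]'hj) := by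
      rw [hk]
      apply pv_min?_spec (fun k => d.getD k 0) names j hj
      · intro k hk'
        have hkj : k ≠ j := Nat.ne_of_lt hk'
        have hmemk : ((f k : Int), (k : Int)) ∈ pvS f names.length :=
          List.mem_map_of_mem (List.mem_range.2 (hk'.trans hj))
        rcases hlexmin _ hmemk with he | hlt'
        · exfalso
          have := congrArg Prod.snd he
          simp only at this
          exact hkj (by exact_mod_cast this)
        · rw [pvLexLt_iff] at hlt'
          simp only at hlt'
          rw [hg j hj, hg k (hk'.trans hj)]
          have : (j : Int) < (k : Int) → False := by intro hh; exact absurd (by exact_mod_cast hh) (by omega)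
          rcases hlt' with h1 | ⟨h1, h2⟩
          · exact h1
          · exact absurd (by exact_mod_cast h2) (by omega)
      · intro k hk'
        rw [hg j hj, hg k hk']
        have hmemk : ((f k : Int), (k : Int)) ∈ pvS f names.length :=
          List.mem_map_of_mem (List.mem_range.2 hk')
        rcases hlexmin _ hmemk with he | hlt'
        · have : f k = f j := congrArg Prod.fst he
          omega
        · rw [pvLexLt_iff] at hlt'
          simp only at hlt'
          omega
    -- B chooses the same name
    have hB : PySem.List.pyGetD names ((j : Int)) "" = names[j]'hj := by
      rw [PySem.List.pyGetD_natCast, List.getD_eq_getElem names "" hj]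
    refine ⟨Function.update f j (f j + 1), ?_, ?_, ?_, ?_, ?_⟩
    · -- assignments agree
      simp only [pvStepA, pvStepB, hchosen, hB]
    all_goals simp only [pvStepA, pvStepB, hchosen, hB]
    · -- keys unchanged
      rw [PySem.Dict.keys_insert_of_contains _ _ ((PySem.Dict.contains_iff_mem_keys d _).2 (by rw [hk]; exact List.getElem_mem hj))]
      exact hk
    · -- counts tracked
      intro k hk'
      rw [PySem.Dict.getD_insert]
      rw [Function.update_apply]
      by_cases hkj : k = j
      · subst hkj
        rw [if_pos rfl, if_pos rfl, hg k hk']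
      · rw [if_neg ?_, if_neg hkj, hg k hk']
        intro he
        exact hkj (hnd.getElem_inj_iff.1 he)
    · -- permutation
      have e1 : (List.range names.length).Perm (j :: (List.range names.length).erase j) :=
        List.perm_cons_erase (List.mem_range.2 hj)
      have e2 : (pvS f names.length).Perm (((f j : Int), (j : Int)) ::
          ((List.range names.length).erase j).map (fun k : Nat => ((f k : Int), (k : Int)))) :=
        e1.map _
      have e3 : (pvS (Function.update f j (f j + 1)) names.length).Perm
          ((f j + 1, (j : Int)) ::
          ((List.range names.length).erase j).map (fun k : Nat => ((Function.update f j (f j + 1) k : Int), (k : Int)))) := by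
        have := e1.map (fun k : Nat => ((Function.update f j (f j + 1) k : Int), (k : Int)))
        simpa [Function.update_self] using this
      have hTT : ((List.range names.length).erase j).map
            (fun k : Nat => ((Function.update f j (f j + 1) k : Int), (k : Int)))
          = ((List.range names.length).erase j).map (fun k : Nat => ((f k : Int), (k : Int))) := by
        apply List.map_congr_left
        intro k hkmem
        have hkj : k ≠ j := ((List.Nodup.mem_erase_iff List.nodup_range).1 hkmem).1
        rw [Function.update_apply, if_neg hkj]
      rw [hTT] at e3
      have hrestT : rest.Perm (((List.range names.length).erase j).map (fun k : Nat => ((f k : Int), (k : Int)))) :=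
        (hperm.trans e2).cons_inv
      exact (PySem.List.insertBy_perm _ _ _).trans ((hrestT.cons _).trans e3.symm)
    · -- pairwise
      exact pv_insertBy_pairwise _ rest (List.pairwise_cons.1 hpw).2 hrest2

theorem pv_fold (names : List String) (hnd : names.Nodup) :
    ∀ (students : List String) (asg : PySem.Dict String String) (f : Nat → Int)
      (d : PySem.Dict String Int) (pq : List (Int × Int)), pvInv names f d pq →
      ∃ f', (students.foldl pvStepA (asg, d)).1 = (students.foldl (pvStepB names) (asg, pq)).1 ∧
        pvInv names f' (students.foldl pvStepA (asg, d)).2 (students.foldl (pvStepB names) (asg, pq)).2 := by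
  intro students
  induction students with
  | nil => intro asg f d pq h; exact ⟨f, rfl, h⟩
  | cons s rest ih =>
    intro asg f d pq h
    obtain ⟨f', h1, h2⟩ := pv_step names hnd f d pq asg h s
    rw [List.foldl_cons, List.foldl_cons]
    have eb : pvStepB names (asg, pq) s
        = ((pvStepA (asg, d) s).1, (pvStepB names (asg, pq) s).2) := by
      rw [h1]
    rw [eb]
    exact ih (pvStepA (asg, d) s).1 f' (pvStepA (asg, d) s).2 (pvStepB names (asg, pq) s).2 h2


-- ===== VERDICT (by name: the statement is the Claim_ definition above) =====
theorem pv_init_inv (initial_counts : List (String × Int)) :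
    pvInv (PySem.Dict.ofList initial_counts).keys
      (fun j => (PySem.Dict.ofList initial_counts).getD ((PySem.Dict.ofList initial_counts).keys.getD j "") 0)
      (PySem.Dict.ofList initial_counts)
      (((PySem.Dict.ofList initial_counts).items.zipIdx).foldl
        (fun pq p => PySem.List.insertBy pvLexLt (p.1.2, (p.2 : Int)) pq) []) := by
  set d0 := PySem.Dict.ofList initial_counts with hd0
  set names := d0.keys with hnames
  have hnd : names.Nodup := PySem.Dict.nodup_keys_ofList initial_counts
  set f0 : Nat → Int := fun j => d0.getD (names.getD j "") 0 with hf0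
  have hitems : d0.items = names.map (fun k => (k, d0.getD k 0)) :=
    PySem.Dict.items_eq_map_keys d0 hnd 0
  have hlen : d0.items.length = names.length := by rw [hitems, List.length_map]
  have hL0 : (d0.items.zipIdx).map (fun p => (p.1.2, (p.2 : Int))) = pvS f0 names.length := by
    apply List.ext_getElem
    · simp [pvS, hlen]
    · intro m h1 h2
      have hm : m < names.length := by simpa [pvS] using h2
      have hmi : m < d0.items.length := by omega
      simp only [List.getElem_map, List.getElem_zipIdx, pvS, List.getElem_range]
      rw [List.getElem_of_eq hitems hmi]
      simp only [List.getElem_map]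
      refine Prod.ext ?_ ?_
      · show d0.getD (names[m]'hm) 0 = f0 m
        have hge : names.getD m "" = names[m]'hm := List.getD_eq_getElem names "" hm
        simp only [hf0, hge]
      · show ((0 + m : Nat) : Int) = (m : Int)
        norm_num
  have hsndnd : ((pvS f0 names.length).map Prod.snd).Nodup := by
    simp only [pvS, List.map_map]
    have he : (Prod.snd ∘ fun k : Nat => ((f0 k : Int), (k : Int))) = fun k : Nat => (k : Int) := rfl
    rw [he]
    exact (List.nodup_range).map (fun a b hab => by exact_mod_cast hab)
  have hbuild := pv_build_go (pvS f0 names.length) [] List.Pairwise.nil (by simpa using hsndnd)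
  have hfold0 : ((d0.items.zipIdx).foldl
        (fun pq p => PySem.List.insertBy pvLexLt (p.1.2, (p.2 : Int)) pq) [])
      = (pvS f0 names.length).foldl (fun pq x => PySem.List.insertBy pvLexLt x pq) [] := by
    rw [← hL0, List.foldl_map]
  refine ⟨rfl, ?_, ?_, ?_⟩
  · intro j hj
    have hge : names.getD j "" = names[j]'hj := List.getD_eq_getElem names "" hj
    simp only [hf0, hge]
  · rw [hfold0]
    simpa using hbuild.1
  · rw [hfold0]
    exact hbuild.2

theorem distribute_assistants_spec : Claim_equal_distribute_assistants := by
  unfold Claim_equal_distribute_assistants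
  intro students assistants initial_counts _ _
  unfold Spec_distribute_assistants
  unfold distribute_assistants distribute_assistants_alt
  set d0 := PySem.Dict.ofList initial_counts with hd0
  set names := d0.keys with hnames
  have hnd : names.Nodup := PySem.Dict.nodup_keys_ofList initial_counts
  set f0 : Nat → Int := fun j => d0.getD (names.getD j "") 0 with hf0
  set pq0 := ((d0.items.zipIdx).foldl
      (fun pq p => PySem.List.insertBy pvLexLt (p.1.2, (p.2 : Int)) pq) []) with hpq0
  have inv0 : pvInv names f0 d0 pq0 := pv_init_inv initial_counts
  obtain ⟨f', hasg, hk', hg', hperm', hpw'⟩ :=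
    pv_fold names hnd students PySem.Dict.empty f0 d0 pq0 inv0
  set stA := students.foldl pvStepA (PySem.Dict.empty, d0) with hstA
  set stB := students.foldl (pvStepB names) (PySem.Dict.empty, pq0) with hstB
  have hpwS : (pvS f' names.length).Pairwise (fun a b => (fun t : Int × Int => t.2) a < (fun t : Int × Int => t.2) b) := by
    simp only [pvS]
    rw [List.pairwise_map]
    exact (List.pairwise_lt_range).imp (fun h => by simpa using h)
  have hsorted : PySem.List.sorted stB.2 (fun t => t.2) false = pvS f' names.length :=
    PySem.List.sorted_eq_of_perm_of_pairwise_lt stB.2 (pvS f' names.length) (fun t => t.2)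
      hperm'.symm hpwS
  have hP : (pvS f' names.length).map (fun t => (PySem.List.pyGetD names t.2 "", t.1))
      = names.map (fun k => (k, stA.2.getD k 0)) := by
    apply List.ext_getElem
    · simp [pvS]
    · intro m h1 h2
      have hm : m < names.length := by simpa using h2
      simp only [pvS, List.map_map, List.getElem_map, List.getElem_range, Function.comp]
      rw [PySem.List.pyGetD_natCast, List.getD_eq_getElem names "" hm, hg' m hm]
  set P := names.map (fun k => (k, stA.2.getD k 0)) with hPdef
  have hfst : (P.map (fun p => p.1)).Nodup := by
    have he : P.map (fun p => p.1) = names := by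
      rw [hPdef, List.map_map]
      exact List.map_id names
    rw [he]; exact hnd
  have hofl : (PySem.Dict.ofList P).items = P := by
    have h := PySem.Dict.items_foldl_insert_fresh P (fun p => p.1) (fun p => p.2)
      PySem.Dict.empty (fun a _ => @PySem.Dict.contains_empty String Int _ a.1) hfst
    simpa using h
  have hAitems : stA.2.items = P := by
    have h := PySem.Dict.items_eq_map_keys stA.2 (by rw [hk']; exact hnd) 0
    rw [h, hk']
  refine Prod.ext ?_ ?_
  · simpa using congrArg PySem.Dict.items hasg
  · show stA.2.items = (PySem.Dict.ofList ((PySem.List.sorted stB.2 (fun t => t.2) false).map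
      (fun t => (PySem.List.pyGetD names t.2 "", t.1)))).items
    rw [hsorted, hP, hofl, hAitems]
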